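-- pv_equiv track=rewrite | github.com/Dwiyulianto31072k4/luxquant-terminal | backend/app/services/coin_intel_worker.py | _calc_tp4_streaks
-- ===== SOURCE A (Python) =====
-- def _calc_tp4_streaks(history, total_tp4):
--     """Count consecutive TP4 hits and longest TP4 streak."""
--     if total_tp4 == 0: return {"total_tp4": 0, "longest_streak": 0, "current_tp4_streak": 0}
--     best_streak = current = 0
--     for h in reversed(history):  # oldest first
--         if h["outcome"] == "tp4":
--             current += 1
--             best_streak = max(best_streak, current)
--         else:
--             current = 0
--     # Current TP4 streak (from most recent)
--     current_streak = 0
--     for h in history: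
--         if h["outcome"] == "tp4": current_streak += 1
--         else: break
--     return {"total_tp4": total_tp4, "longest_streak": best_streak, "current_tp4_streak": current_streak}
-- ===== SOURCE B (Python) =====
-- def _runs(flags):
--     """Lengths of the maximal runs of True in flags, in order."""
--     runs = []
--     i, n = 0, len(flags)
--     while i < n:
--         if not flags[i]:
--             i += 1
--         else:
--             j = i
--             while j < n and flags[j]:
--                 j += 1
--             runs.append(j - i)
--             i = j
--     return runs
--
-- def _calc_tp4_streaks(history, total_tp4):
--     """Run-length decomposition: longest streak = max run, current = first run if leading."""
--     if total_tp4 == 0: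
--         return {"total_tp4": 0, "longest_streak": 0, "current_tp4_streak": 0}
--     flags = [h["outcome"] == "tp4" for h in history]
--     runs = _runs(flags)
--     longest = max(runs, default=0)
--     current = runs[0] if flags and flags[0] else 0
--     return {"total_tp4": total_tp4, "longest_streak": longest, "current_tp4_streak": current}
-- ===== Notes on version B (the rewrite author's own statement) =====
-- stated objective: alternative
-- what changed: Replaces A's two directional scans with manual counters (a reversed pass maintaining best/current, plus a forward pass with break) by a run-length decomposition: compute the list of lengths of maximal tp4 runs once, then longest = max(runs, default=0) and current = first run if the history starts with tp4.
import Mathlib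
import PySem

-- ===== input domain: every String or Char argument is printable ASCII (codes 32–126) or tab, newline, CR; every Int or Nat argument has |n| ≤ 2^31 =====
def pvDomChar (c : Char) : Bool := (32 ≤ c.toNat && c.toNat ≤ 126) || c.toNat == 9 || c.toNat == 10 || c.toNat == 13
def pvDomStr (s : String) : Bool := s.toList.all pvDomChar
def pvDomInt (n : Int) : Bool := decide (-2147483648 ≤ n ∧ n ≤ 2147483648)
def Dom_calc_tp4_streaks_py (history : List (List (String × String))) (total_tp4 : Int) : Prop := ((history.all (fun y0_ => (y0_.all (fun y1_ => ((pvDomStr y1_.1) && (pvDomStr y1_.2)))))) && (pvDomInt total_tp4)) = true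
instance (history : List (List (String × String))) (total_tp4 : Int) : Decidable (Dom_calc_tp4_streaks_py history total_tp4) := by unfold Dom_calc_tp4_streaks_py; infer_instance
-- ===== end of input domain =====

-- B replaces A's two directional counter scans by a run-length decomposition:
-- list the lengths of the maximal tp4 runs once, then take max and first.

-- h["outcome"] == "tp4": first-match association-list lookup (Python dict semantics);
-- under Pre_ the key is present, so the getD default is never the looked-up value.
def pv_isTp4 (h : List (String × String)) : Bool :=
  (((h.find? (fun p => p.1 == "outcome")).map (fun p => p.2)).getD "") == "tp4"

-- ===== PORT A =====
-- the forward loop with break computing current_streak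
def pvA_cur : List (List (String × String)) → Int
  | [] => 0
  | h :: t => if pv_isTp4 h then 1 + pvA_cur t else 0

def calc_tp4_streaks_py (history : List (List (String × String))) (total_tp4 : Int) : List (String × Int) :=
  if total_tp4 = 0 then [("total_tp4", 0), ("longest_streak", 0), ("current_tp4_streak", 0)]
  else
    let p := history.reverse.foldl
      (fun (s : Int × Int) h => if pv_isTp4 h then (max s.1 (s.2 + 1), s.2 + 1) else (s.1, 0))
      (0, 0)
    [("total_tp4", total_tp4), ("longest_streak", p.1), ("current_tp4_streak", pvA_cur history)]

-- ===== PORT B =====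
-- inner 'while j < n and flags[j]': length of the leading True run
def pvLeadRun : List Bool → Int
  | [] => 0
  | true :: t => 1 + pvLeadRun t
  | false :: _ => 0

-- rest of the list after the leading True run (the outer loop resumes at i = j)
def pvAfterRun : List Bool → List Bool
  | [] => []
  | true :: t => pvAfterRun t
  | false :: t => false :: t

theorem pvAfterRun_len_le (l : List Bool) : (pvAfterRun l).length ≤ l.length := by
  induction l with
  | nil => simp [pvAfterRun]
  | cons f t ih => cases f <;> simp [pvAfterRun] <;> omega

-- _runs(flags): lengths of maximal True runs, in order
def pvRuns : List Bool → List Int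
  | [] => []
  | false :: t => pvRuns t
  | true :: t => (1 + pvLeadRun t) :: pvRuns (pvAfterRun t)
  termination_by l => l.length
  decreasing_by
    · simp only [List.length_cons]; omega
    · have := pvAfterRun_len_le t; simp only [List.length_cons]; omega

def calc_tp4_streaks_py_alt (history : List (List (String × String))) (total_tp4 : Int) : List (String × Int) :=
  if total_tp4 = 0 then [("total_tp4", 0), ("longest_streak", 0), ("current_tp4_streak", 0)]
  else
    let flags := history.map pv_isTp4
    let runs := pvRuns flags
    let longest := (PySem.List.max? runs (fun x => x)).getD 0   -- max(runs, default=0)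
    let current := if flags.headD false then runs.headD 0 else 0
    [("total_tp4", total_tp4), ("longest_streak", longest), ("current_tp4_streak", current)]

-- ===== PRECONDITION & SPEC =====
-- Pre_ excludes exactly the inputs where Python A raises KeyError: an entry without the
-- "outcome" key while total_tp4 ≠ 0 (A returns early when total_tp4 == 0).
def Pre_calc_tp4_streaks_py (history : List (List (String × String))) (total_tp4 : Int) : Prop :=
  total_tp4 = 0 ∨ ∀ h ∈ history, (h.find? (fun p => p.1 == "outcome")).isSome
instance (history : List (List (String × String))) (total_tp4 : Int) : Decidable (Pre_calc_tp4_streaks_py history total_tp4) := by unfold Pre_calc_tp4_streaks_py; infer_instance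

def pvWitness_calc_tp4_streaks_py : (List (List (String × String))) × Int :=
  ([[("outcome", "tp4")], [("outcome", "sl")], [("outcome", "tp4")]], 2)

def Spec_calc_tp4_streaks_py (history : List (List (String × String))) (total_tp4 : Int) (out : List (String × Int)) : Prop := out = calc_tp4_streaks_py_alt history total_tp4
instance (history : List (List (String × String))) (total_tp4 : Int) (out : List (String × Int)) : Decidable (Spec_calc_tp4_streaks_py history total_tp4 out) := by unfold Spec_calc_tp4_streaks_py; infer_instance

-- ===== CLAIM (what is proved, stated in full; the proofs are below) =====
def Claim_equal_calc_tp4_streaks_py : Prop := ∀ (history : List (List (String × String))) (total_tp4 : Int), Dom_calc_tp4_streaks_py history total_tp4 → Pre_calc_tp4_streaks_py history total_tp4 → Spec_calc_tp4_streaks_py history total_tp4 (calc_tp4_streaks_py history total_tp4)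

-- ===== LEMMAS AND PROOFS =====

-- A's reversed-loop body, abstracted over the boolean flag
def pvStep (s : Int × Int) (f : Bool) : Int × Int :=
  if f then (max s.1 (s.2 + 1), s.2 + 1) else (s.1, 0)

-- best streak, characterised structurally on the flag list
def pvMaxRun : List Bool → Int
  | [] => 0
  | true :: t => max (1 + pvLeadRun t) (pvMaxRun t)
  | false :: t => pvMaxRun t

theorem pvLeadRun_nonneg (l : List Bool) : 0 ≤ pvLeadRun l := by
  induction l with
  | nil => simp [pvLeadRun]
  | cons f t ih => cases f <;> simp [pvLeadRun] <;> omega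

theorem pvMaxRun_nonneg (l : List Bool) : 0 ≤ pvMaxRun l := by
  induction l with
  | nil => simp [pvMaxRun]
  | cons f t ih =>
    cases f
    · simpa [pvMaxRun] using ih
    · simp [pvMaxRun]; omega

-- A's reversed loop, read as a foldr, computes (pvMaxRun, pvLeadRun)
theorem pv_foldr_eq (l : List Bool) :
    l.foldr (fun f s => pvStep s f) (0, 0) = (pvMaxRun l, pvLeadRun l) := by
  induction l with
  | nil => rfl
  | cons f t ih =>
    simp only [List.foldr, ih]
    cases f
    · rfl
    · show pvStep (pvMaxRun t, pvLeadRun t) true = _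
      rw [pvMaxRun, pvLeadRun]
      simp [pvStep, Prod.ext_iff]
      omega

-- pvMaxRun splits across the leading run
theorem pvMaxRun_split (l : List Bool) :
    pvMaxRun l = max (pvLeadRun l) (pvMaxRun (pvAfterRun l)) := by
  induction l with
  | nil => simp [pvMaxRun, pvLeadRun, pvAfterRun]
  | cons f t ih =>
    cases f
    · have := pvMaxRun_nonneg t
      simp only [pvMaxRun, pvLeadRun, pvAfterRun]
      omega
    · have h1 := pvLeadRun_nonneg t
      simp only [pvMaxRun, pvLeadRun, pvAfterRun, ih]
      omega

-- folded max of the run list equals pvMaxRun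
theorem pv_foldl_max_runs (l : List Bool) : ∀ a : Int, 0 ≤ a →
    (pvRuns l).foldl max a = max a (pvMaxRun l) := by
  induction l using pvRuns.induct with
  | case1 => intro a ha; simp [pvRuns, pvMaxRun]; omega
  | case2 t ih =>
    intro a ha
    simp only [pvRuns, pvMaxRun]
    exact ih a ha
  | case3 t ih =>
    intro a ha
    have h1 := pvLeadRun_nonneg t
    simp only [pvRuns, List.foldl_cons]
    rw [ih (max a (1 + pvLeadRun t)) (by omega)]
    simp only [pvMaxRun]
    rw [pvMaxRun_split t]
    omega

-- every run length is at least 1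
theorem pvRuns_pos (l : List Bool) : ∀ x ∈ pvRuns l, (1 : Int) ≤ x := by
  induction l using pvRuns.induct with
  | case1 => simp [pvRuns]
  | case2 t ih => simpa [pvRuns] using ih
  | case3 t ih =>
    have := pvLeadRun_nonneg t
    simp only [pvRuns, List.mem_cons]
    rintro x (rfl | hx)
    · omega
    · exact ih x hx

theorem pv_max?_runs (l : List Bool) :
    (PySem.List.max? (pvRuns l) (fun x => x)).getD 0 = pvMaxRun l := by
  have hfold : (pvRuns l).foldl max 0 = pvMaxRun l := by
    rw [pv_foldl_max_runs l 0 le_rfl]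
    have := pvMaxRun_nonneg l; omega
  rcases h : pvRuns l with _ | ⟨x, t⟩
  · rw [h] at hfold
    rw [(PySem.List.max?_eq_none_iff _ _).mpr rfl]
    simpa using hfold
  · have hx : 1 ≤ x := pvRuns_pos l x (h ▸ List.mem_cons_self ..)
    rw [h] at hfold
    rw [PySem.List.max?_id_cons]
    simp only [List.foldl_cons] at hfold
    have : max (0 : Int) x = x := by omega
    rw [this] at hfold
    simpa using hfold

-- first run equals the leading run when the list starts with true
theorem pv_runs_head (l : List Bool) :
    (if l.headD false then (pvRuns l).headD 0 else 0) = pvLeadRun l := by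
  rcases l with _ | ⟨f, t⟩
  · rfl
  · cases f
    · rfl
    · simp [pvRuns, pvLeadRun]

-- A's current-streak loop computes pvLeadRun of the flags
theorem pvA_cur_eq (history : List (List (String × String))) :
    pvA_cur history = pvLeadRun (history.map pv_isTp4) := by
  induction history with
  | nil => rfl
  | cons h t ih =>
    by_cases hf : pv_isTp4 h
    · simp [pvA_cur, hf, pvLeadRun, ih]
    · simp [pvA_cur, hf, pvLeadRun]

-- ===== VERDICT (by name: the statement is the Claim_ definition above) =====
theorem calc_tp4_streaks_py_spec : Claim_equal_calc_tp4_streaks_py := by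
  intro history total_tp4 _ _
  unfold Spec_calc_tp4_streaks_py calc_tp4_streaks_py calc_tp4_streaks_py_alt
  by_cases h0 : total_tp4 = 0
  · simp [h0]
  · simp only [if_neg h0]
    have hA : history.reverse.foldl
        (fun (s : Int × Int) h => if pv_isTp4 h then (max s.1 (s.2 + 1), s.2 + 1) else (s.1, 0))
        (0, 0)
        = (history.map pv_isTp4).reverse.foldl pvStep (0, 0) := by
      rw [← List.map_reverse, List.foldl_map]
      rfl
    rw [hA, List.foldl_reverse, pv_foldr_eq, pv_max?_runs, pv_runs_head, pvA_cur_eq]
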